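-- pv_equiv track=rewrite | github.com/DPNT-Sourcecode/CHK-ahvh01 | tes.py | process_freebies
-- ===== SOURCE A (Python) =====
-- PRODUCT_PRICES = {
--     "A": 50,
--     "B": 30,
--     "C": 20,
--     "D": 15,
--     "E": 40,
--     "F": 10,
--     "G": 20,
--     "H": 10,
--     "I": 35,
--     "J": 60,
--     "K": 70,
--     "L": 90,
--     "M": 15,
--     "N": 40,
--     "O": 10,
--     "P": 50,
--     "Q": 30,
--     "R": 50,
--     "S": 20,
--     "T": 20,
--     "U": 40,
--     "V": 50,
--     "W": 20,
--     "X": 17,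
--     "Y": 20,
--     "Z": 21,
-- }
--
-- FREEBIES_OFFERS = {
--     # Product: Amount, Freebie_Product, Freebie_Amount
--     "E": [2, "B", 1],
--     "F": [2, "F", 1],
--     "N": [3, "M", 1],
--     "R": [3, "Q", 1],
--     "U": [3, "U", 1],
-- }
--
-- def process_freebies(cart, total):
--     for item, offer in FREEBIES_OFFERS.items():
--         if cart.get(item):
--             item_amount_required, freebie_product, freebies_amount = offer
--             if item == freebie_product:
--                 item_amount_required += freebies_amount
--
--             while (
--                 cart[item] // item_amount_required
--                 and cart[freebie_product] // freebies_amount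
--             ):
--                 if item == freebie_product:
--                     total += (item_amount_required - freebies_amount) * PRODUCT_PRICES[
--                         item
--                     ]
--                     cart[item] -= item_amount_required
--                 else:
--                     total += item_amount_required * PRODUCT_PRICES[item]
--                     cart[item] -= item_amount_required
--                     cart[freebie_product] -= freebies_amount
--
--     return total, cart
-- ===== SOURCE B (Python) =====
-- PRODUCT_PRICES = {
--     "A": 50, "B": 30, "C": 20, "D": 15, "E": 40, "F": 10, "G": 20, "H": 10,
--     "I": 35, "J": 60, "K": 70, "L": 90, "M": 15, "N": 40, "O": 10, "P": 50,
--     "Q": 30, "R": 50, "S": 20, "T": 20, "U": 40, "V": 50, "W": 20, "X": 17,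
--     "Y": 20, "Z": 21,
-- }
--
-- FREEBIES_OFFERS = {
--     # Product: Amount, Freebie_Product, Freebie_Amount
--     "E": [2, "B", 1],
--     "F": [2, "F", 1],
--     "N": [3, "M", 1],
--     "R": [3, "Q", 1],
--     "U": [3, "U", 1],
-- }
--
-- def process_freebies(cart, total):
--     # closed form per offer: apply it k times at once, k found by floor division
--     for item, (need, free, free_amt) in FREEBIES_OFFERS.items():
--         if not cart.get(item):
--             continue
--         if item == free:
--             k = cart[item] // (need + free_amt)
--             if k > 0:
--                 total += k * need * PRODUCT_PRICES[item]
--                 cart[item] -= k * (need + free_amt)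
--         else:
--             k = cart[item] // need
--             if k > 0:
--                 k = min(k, cart[free] // free_amt)
--             if k > 0:
--                 total += k * need * PRODUCT_PRICES[item]
--                 cart[item] -= k * need
--                 cart[free] -= k * free_amt
--     return total, cart
-- ===== Notes on version B (the rewrite author's own statement) =====
-- stated objective: alternative
-- what changed: Each offer's per-unit while loop (one subtraction per application) is replaced by a single closed-form update: the number of applications k is computed by floor division (min of the two floor divisions for cross-product offers) and total and cart are adjusted once.
-- outside the precondition, e.g. on process_freebies({'E': -1, 'B': 2}, 0): A returns (160, {'E': -5, 'B': 0}), B returns (0, {'E': -1, 'B': 2}); on process_freebies({'F': -1}, 0): A does not finish within the time limit, B returns (0, {'F': -1})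
import Mathlib
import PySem

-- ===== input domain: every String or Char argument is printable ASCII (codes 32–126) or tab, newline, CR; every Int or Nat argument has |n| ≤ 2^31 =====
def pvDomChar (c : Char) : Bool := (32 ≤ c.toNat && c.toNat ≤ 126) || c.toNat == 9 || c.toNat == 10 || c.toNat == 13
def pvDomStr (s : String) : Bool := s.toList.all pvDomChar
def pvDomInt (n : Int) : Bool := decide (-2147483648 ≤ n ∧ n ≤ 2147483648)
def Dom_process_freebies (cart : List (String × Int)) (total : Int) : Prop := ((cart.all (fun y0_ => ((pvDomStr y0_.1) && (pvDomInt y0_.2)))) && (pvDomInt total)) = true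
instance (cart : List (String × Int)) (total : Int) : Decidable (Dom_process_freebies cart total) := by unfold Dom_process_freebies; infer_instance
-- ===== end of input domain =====

-- B replaces each offer's per-unit while loop by one closed-form floor-division update (the
-- offer applied k times at once); both programs mutate the cart dict in place and return it —
-- the theorems are about the returned (total, cart) value.

-- Shared module-level constants of the Python file (used by both A and B).
def pvPrices : PySem.Dict String Int := PySem.Dict.ofList
  [("A", 50), ("B", 30), ("C", 20), ("D", 15), ("E", 40), ("F", 10), ("G", 20), ("H", 10),
   ("I", 35), ("J", 60), ("K", 70), ("L", 90), ("M", 15), ("N", 40), ("O", 10), ("P", 50),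
   ("Q", 30), ("R", 50), ("S", 20), ("T", 20), ("U", 40), ("V", 50), ("W", 20), ("X", 17),
   ("Y", 20), ("Z", 21)]

-- FREEBIES_OFFERS as (item, amount, freebie_product, freebie_amount), in dict order.
def pvOffers : List (String × Int × String × Int) :=
  [("E", 2, "B", 1), ("F", 2, "F", 1), ("N", 3, "M", 1), ("R", 3, "Q", 1), ("U", 3, "U", 1)]

-- ===== PORT A =====
-- A's while loop.  Python reads cart[item] / cart[freebie_product]; under Pre_ every key that is
-- actually read is present, so getD _ 0 is exact there (Python raises KeyError otherwise; those
-- inputs are outside Pre_).  fuel bounds the iteration count only to make the recursion total;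
-- under Pre_ the loop stops before fuel runs out.
def pvLoopA (item free : String) (req amt price : Int) :
    Nat → Int → PySem.Dict String Int → Int × PySem.Dict String Int
  | 0, total, c => (total, c)
  | fuel + 1, total, c =>
    if PySem.Int.floordiv (c.getD item 0) req ≠ 0 ∧ PySem.Int.floordiv (c.getD free 0) amt ≠ 0 then
      if item = free then
        pvLoopA item free req amt price fuel (total + (req - amt) * price)
          (c.insert item (c.getD item 0 - req))
      else
        pvLoopA item free req amt price fuel (total + req * price)
          ((c.insert item (c.getD item 0 - req)).insert free (c.getD free 0 - amt))
    else (total, c)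

-- one iteration of A's 'for item, offer in FREEBIES_OFFERS.items()'
def pvStepA (st : Int × PySem.Dict String Int) (off : String × Int × String × Int) :
    Int × PySem.Dict String Int :=
  let (item, req, free, amt) := off
  match st.2.get? item with
  | none => st
  | some v =>
    if v = 0 then st                                   -- cart.get(item) falsy
    else
      let req' := if item = free then req + amt else req
      pvLoopA item free req' amt (pvPrices.getD item 0) (v.natAbs + 1) st.1 st.2

def process_freebies (cart : List (String × Int)) (total : Int) : Int × (List (String × Int)) :=
  let r := pvOffers.foldl pvStepA (total, PySem.Dict.mk cart)
  (r.1, r.2.items)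

-- ===== PORT B =====
-- one iteration of B's loop: the whole offer applied k times at once
def pvStepB (st : Int × PySem.Dict String Int) (off : String × Int × String × Int) :
    Int × PySem.Dict String Int :=
  let (item, need, free, amt) := off
  match st.2.get? item with
  | none => st
  | some v =>
    if v = 0 then st                                   -- not cart.get(item)
    else if item = free then
      let k := PySem.Int.floordiv v (need + amt)
      if 0 < k then
        (st.1 + k * need * pvPrices.getD item 0, st.2.insert item (v - k * (need + amt)))
      else st
    else
      let k0 := PySem.Int.floordiv v need
      -- cart[free] is read only when k0 > 0; then Pre_ guarantees the key is present, so getD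
      -- is exact (Python raises KeyError otherwise; those inputs are outside Pre_)
      let k := if 0 < k0 then min k0 (PySem.Int.floordiv (st.2.getD free 0) amt) else k0
      if 0 < k then
        (st.1 + k * need * pvPrices.getD item 0,
         (st.2.insert item (v - k * need)).insert free (st.2.getD free 0 - k * amt))
      else st

def process_freebies_alt (cart : List (String × Int)) (total : Int) : Int × (List (String × Int)) :=
  let r := pvOffers.foldl pvStepB (total, PySem.Dict.mk cart)
  (r.1, r.2.items)

-- ===== PRECONDITION & SPEC =====
-- Pre_ excludes: carts holding a negative quantity of an offer product (or of its freebie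
-- product while the offer's threshold is reached) — not meaningful cart contents: A loops
-- forever on some of them (e.g. {'F': -1}) and on others returns totals from applying an offer
-- against a negative count; and carts where an offer's threshold is reached but the freebie
-- product's key is missing, on which both A and B raise KeyError.  Quantities of all other
-- products are unconstrained (the offers never touch them).
def Pre_process_freebies (cart : List (String × Int)) (total : Int) : Prop :=
  0 ≤ (PySem.Dict.mk cart).getD "E" 0 ∧
  0 ≤ (PySem.Dict.mk cart).getD "F" 0 ∧
  0 ≤ (PySem.Dict.mk cart).getD "N" 0 ∧
  0 ≤ (PySem.Dict.mk cart).getD "R" 0 ∧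
  0 ≤ (PySem.Dict.mk cart).getD "U" 0 ∧
  (2 ≤ (PySem.Dict.mk cart).getD "E" 0 →
    0 ≤ (PySem.Dict.mk cart).getD "B" 0 ∧ (PySem.Dict.mk cart).contains "B" = true) ∧
  (3 ≤ (PySem.Dict.mk cart).getD "N" 0 →
    0 ≤ (PySem.Dict.mk cart).getD "M" 0 ∧ (PySem.Dict.mk cart).contains "M" = true) ∧
  (3 ≤ (PySem.Dict.mk cart).getD "R" 0 →
    0 ≤ (PySem.Dict.mk cart).getD "Q" 0 ∧ (PySem.Dict.mk cart).contains "Q" = true)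
instance (cart : List (String × Int)) (total : Int) : Decidable (Pre_process_freebies cart total) := by
  unfold Pre_process_freebies; infer_instance

def pvWitness_process_freebies : (List (String × Int)) × Int := ([("E", 3), ("B", 2), ("F", 7)], 5)

def Spec_process_freebies (cart : List (String × Int)) (total : Int) (out : Int × (List (String × Int))) : Prop := out = process_freebies_alt cart total
instance (cart : List (String × Int)) (total : Int) (out : Int × (List (String × Int))) : Decidable (Spec_process_freebies cart total out) := by unfold Spec_process_freebies; infer_instance

-- ===== CLAIM (what is proved, stated in full; the proofs are below) =====
def Claim_equal_process_freebies : Prop := ∀ (cart : List (String × Int)) (total : Int), Dom_process_freebies cart total → Pre_process_freebies cart total → Spec_process_freebies cart total (process_freebies cart total)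

-- ===== LEMMAS AND PROOFS =====

lemma pv_not_contains_ne (c : PySem.Dict String Int) {j : String} (hj : ¬ c.contains j = true) :
    ∀ p ∈ c.items, p.1 ≠ j := by
  intro p hp e
  apply hj
  rw [PySem.Dict.contains_eq_decide_mem_keys]
  simp only [decide_eq_true_eq, PySem.Dict.keys]
  exact e ▸ List.mem_map_of_mem hp

-- two inserts at distinct keys: a later overwrite of the first key commutes past the second
lemma pv_insert_collapse (c : PySem.Dict String Int) {i f : String} (h : i ≠ f) (a b x : Int) :
    ((c.insert i a).insert f b).insert i x = (c.insert i x).insert f b := by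
  apply PySem.Dict.ext
  have hfi : f ≠ i := fun e => h e.symm
  by_cases hci : c.contains i = true <;> by_cases hcf : c.contains f = true <;>
    simp [PySem.Dict.items_insert, PySem.Dict.contains_insert, hci, hcf, h, hfi,
          List.map_map, List.map_append]
  · rintro u w -
    by_cases hui : u = i <;> by_cases huf : u = f <;> simp_all
  · rintro u w -
    by_cases hui : u = i <;> simp_all
  · intro u w hw hcond
    exfalso
    by_cases huf : u = f
    · simp [huf, hfi] at hcond
    · simp [huf] at hcond
      exact pv_not_contains_ne c hci (u, w) hw hcond
  · conv_rhs => rw [← List.map_id c.items]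
    apply List.map_congr_left
    intro p hp
    simp [pv_not_contains_ne c hci p hp]

-- A's while loop for a same-item offer (F, U): it runs v // r times
lemma pv_loop_same (item : String) (r price : Int) (hr : 2 ≤ r) :
    ∀ (fuel : Nat) (total : Int) (c : PySem.Dict String Int) (v : Int),
      c.getD item 0 = v → 0 ≤ v → v.natAbs < fuel →
      pvLoopA item item r 1 price fuel total c =
        if 0 < PySem.Int.floordiv v r then
          (total + PySem.Int.floordiv v r * ((r - 1) * price),
           c.insert item (v - PySem.Int.floordiv v r * r))
        else (total, c) := by
  intro fuel
  induction fuel with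
  | zero => intro total c v _ _ hf; exact absurd hf (by omega)
  | succ n ih =>
    intro total c v hgv hv hf
    have hr0 : (0:Int) < r := by omega
    have hd1 : PySem.Int.floordiv v 1 = v := by
      rw [PySem.Int.floordiv_eq_ediv_of_pos one_pos, Int.ediv_one]
    by_cases hvr : r ≤ v
    · have hk1 : 1 ≤ PySem.Int.floordiv v r :=
        (PySem.Int.le_floordiv_iff_mul_le hr0).mpr (by linarith)
      have hb := (PySem.Int.floordiv_eq_iff_of_pos hr0).mp
        (rfl : PySem.Int.floordiv v r = PySem.Int.floordiv v r)
      set k := PySem.Int.floordiv v r with hkdef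
      have hk' : PySem.Int.floordiv (v - r) r = k - 1 := by
        rw [PySem.Int.floordiv_eq_iff_of_pos hr0]
        constructor <;> nlinarith [hb.1, hb.2]
      simp only [pvLoopA, hgv, hd1, if_true]
      rw [if_pos ⟨by omega, by omega⟩]
      rw [ih (total + (r - 1) * price) _ (v - r) (PySem.Dict.getD_insert_self _ _ _ _)
            (by omega) (by omega)]
      rw [hk', if_pos (by omega : (0:Int) < k)]
      by_cases hk2 : (0:Int) < k - 1
      · rw [if_pos hk2, PySem.Dict.insert_insert_self]
        simp only [Prod.mk.injEq]
        constructor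
        · ring
        · congr 1; ring
      · have : k = 1 := by omega
        rw [if_neg hk2, this]
        simp only [Prod.mk.injEq]
        constructor
        · ring
        · congr 1; ring
    · have hk0 : PySem.Int.floordiv v r = 0 := by
        rw [PySem.Int.floordiv_eq_iff_of_pos hr0]
        constructor <;> [simpa using hv; simpa using (by omega : v < r)]
      simp only [pvLoopA, hgv, hk0]
      simp


-- A's while loop for a cross-item offer (E, N, R): it runs min (v // r) f times
lemma pv_loop_cross (item free : String) (hif : item ≠ free) (r price : Int) (hr : 2 ≤ r) :
    ∀ (fuel : Nat) (total : Int) (c : PySem.Dict String Int) (v f : Int),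
      c.getD item 0 = v → c.getD free 0 = f → 0 ≤ v → 0 ≤ f → v.natAbs < fuel →
      pvLoopA item free r 1 price fuel total c =
        if 0 < min (PySem.Int.floordiv v r) f then
          (total + min (PySem.Int.floordiv v r) f * (r * price),
           (c.insert item (v - min (PySem.Int.floordiv v r) f * r)).insert free
             (f - min (PySem.Int.floordiv v r) f))
        else (total, c) := by
  intro fuel
  induction fuel with
  | zero => intro total c v f _ _ _ _ hfu; exact absurd hfu (by omega)
  | succ n ih =>
    intro total c v f hgv hgf hv hf hfu
    have hr0 : (0:Int) < r := by omega
    have hd1 : PySem.Int.floordiv f 1 = f := by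
      rw [PySem.Int.floordiv_eq_ediv_of_pos one_pos, Int.ediv_one]
    by_cases hvr : r ≤ v
    · have hk1 : 1 ≤ PySem.Int.floordiv v r :=
        (PySem.Int.le_floordiv_iff_mul_le hr0).mpr (by linarith)
      have hb := (PySem.Int.floordiv_eq_iff_of_pos hr0).mp
        (rfl : PySem.Int.floordiv v r = PySem.Int.floordiv v r)
      set kv := PySem.Int.floordiv v r with hkdef
      by_cases hf1 : 1 ≤ f
      · have hk' : PySem.Int.floordiv (v - r) r = kv - 1 := by
          rw [PySem.Int.floordiv_eq_iff_of_pos hr0]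
          constructor <;> nlinarith [hb.1, hb.2]
        have hgv' : ((c.insert item (v - r)).insert free (f - 1)).getD item 0 = v - r := by
          rw [PySem.Dict.getD_insert_of_ne _ _ _ hif, PySem.Dict.getD_insert_self]
        have hgf' : ((c.insert item (v - r)).insert free (f - 1)).getD free 0 = f - 1 :=
          PySem.Dict.getD_insert_self _ _ _ _
        simp only [pvLoopA, hgv, hgf, hd1, if_neg hif]
        rw [if_pos ⟨by omega, by omega⟩]
        rw [ih (total + r * price) _ (v - r) (f - 1) hgv' hgf' (by omega) (by omega) (by omega)]
        rw [hk']
        have hmin : min (kv - 1) (f - 1) = min kv f - 1 := by omega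
        rw [hmin, if_pos (by omega : (0:Int) < min kv f)]
        set k := min kv f with hkm
        by_cases hk2 : (0:Int) < k - 1
        · rw [if_pos hk2, pv_insert_collapse _ hif, PySem.Dict.insert_insert_self]
          simp only [Prod.mk.injEq]
          refine ⟨by ring, ?_⟩
          congr 1
          · congr 1; ring
          · ring
        · have hke : k = 1 := by omega
          rw [if_neg hk2, hke]
          simp only [Prod.mk.injEq]
          refine ⟨by ring, ?_⟩
          congr 1
          · congr 1; ring
      · have hfe : f = 0 := by omega
        have hd0 : PySem.Int.floordiv (0:Int) 1 = 0 := by decide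
        simp only [pvLoopA, hgv, hgf, hfe, hd0]
        have : ¬ (PySem.Int.floordiv v r ≠ 0 ∧ (0:Int) ≠ 0) := by simp
        rw [if_neg this, if_neg (by omega : ¬ (0:Int) < min kv 0)]
    · have hk0 : PySem.Int.floordiv v r = 0 := by
        rw [PySem.Int.floordiv_eq_iff_of_pos hr0]
        constructor <;> [simpa using hv; simpa using (by omega : v < r)]
      simp only [pvLoopA, hgv, hgf, hd1, hk0]
      rw [if_neg (by simp), if_neg (by omega : ¬ (0:Int) < min 0 f)]


-- one offer: A's loop equals B's closed form
lemma pv_step_eq (item free : String) (req : Int) (hreq : 2 ≤ req)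
    (st : Int × PySem.Dict String Int)
    (hv : 0 ≤ st.2.getD item 0)
    (hfree : req ≤ st.2.getD item 0 → 0 ≤ st.2.getD free 0) :
    pvStepA st (item, req, free, 1) = pvStepB st (item, req, free, 1) := by
  obtain ⟨t, c⟩ := st
  simp only [] at hv hfree
  simp only [pvStepA, pvStepB]
  cases hg : c.get? item with
  | none => rfl
  | some v =>
    simp only []
    by_cases hz : v = 0
    · simp [hz]
    · simp only [if_neg hz]
      have hgd : c.getD item 0 = v := PySem.Dict.getD_of_get?_eq_some _ _ hg
      have hv0 : 0 ≤ v := hgd ▸ hv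
      by_cases hif : item = free
      · subst hif
        simp only [if_true]
        rw [pv_loop_same item (req + 1) (pvPrices.getD item 0) (by omega) (v.natAbs + 1)
              t c v hgd hv0 (by omega)]
        by_cases h1 : (0:Int) < PySem.Int.floordiv v (req + 1)
        · rw [if_pos h1, if_pos h1]
          simp only [Prod.mk.injEq, and_true]
          ring
        · rw [if_neg h1, if_neg h1]
      · simp only [if_neg hif]
        by_cases h0 : (0:Int) < PySem.Int.floordiv v req
        · have hrv : req ≤ v := by
            simpa using (PySem.Int.le_floordiv_iff_mul_le (by omega : (0:Int) < req)).mp h0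
          have hgf : 0 ≤ c.getD free 0 := hfree (by rw [hgd]; exact hrv)
          have hd1 : PySem.Int.floordiv (c.getD free 0) 1 = c.getD free 0 := by
            rw [PySem.Int.floordiv_eq_ediv_of_pos one_pos, Int.ediv_one]
          rw [pv_loop_cross item free hif req (pvPrices.getD item 0) hreq (v.natAbs + 1)
                t c v (c.getD free 0) hgd rfl hv0 hgf (by omega)]
          rw [hd1, if_pos h0]
          by_cases h1 : (0:Int) < min (PySem.Int.floordiv v req) (c.getD free 0)
          · rw [if_pos h1, if_pos h1]
            simp only [Prod.mk.injEq]
            refine ⟨by ring, ?_⟩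
            congr 1
            · ring
          · rw [if_neg h1, if_neg h1]
        · -- item quantity below the threshold: A's loop exits at once, B skips
          have hk0 : PySem.Int.floordiv v req = 0 := by
            have := (PySem.Int.le_floordiv_iff_mul_le (by omega : (0:Int) < req)).mpr
              (by simpa using hv0 : 0 * req ≤ v)
            omega
          simp only [pvLoopA, hgd, hk0]
          rw [if_neg (by simp)]
          simp

-- B's step leaves every key other than item and free untouched
lemma pv_stepB_pres (item free : String) (req : Int)
    (st : Int × PySem.Dict String Int) (k : String) (h1 : k ≠ item) (h2 : k ≠ free) :
    (pvStepB st (item, req, free, 1)).2.getD k 0 = st.2.getD k 0 := by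
  obtain ⟨t, c⟩ := st
  simp only [pvStepB]
  cases hg : c.get? item with
  | none => rfl
  | some v =>
    simp only []
    split_ifs <;>
      simp [PySem.Dict.getD_insert_of_ne _ _ _ h1, PySem.Dict.getD_insert_of_ne _ _ _ h2]

lemma pv_chain (total : Int) (c : PySem.Dict String Int)
    (hE : 0 ≤ c.getD "E" 0) (hF : 0 ≤ c.getD "F" 0) (hN : 0 ≤ c.getD "N" 0)
    (hR : 0 ≤ c.getD "R" 0) (hU : 0 ≤ c.getD "U" 0)
    (hEB : 2 ≤ c.getD "E" 0 → 0 ≤ c.getD "B" 0)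
    (hNM : 3 ≤ c.getD "N" 0 → 0 ≤ c.getD "M" 0)
    (hRQ : 3 ≤ c.getD "R" 0 → 0 ≤ c.getD "Q" 0) :
    pvOffers.foldl pvStepA (total, c) = pvOffers.foldl pvStepB (total, c) := by
  -- the five offers touch pairwise disjoint key sets {E,B},{F},{N,M},{R,Q},{U}:
  -- each step leaves the later offers' quantities unchanged
  simp only [pvOffers, List.foldl_cons, List.foldl_nil]
  rw [pv_step_eq "E" "B" 2 (by norm_num) (total, c) hE hEB]
  set s1 := pvStepB (total, c) ("E", 2, "B", 1) with hs1
  have g1 : ∀ k, k ≠ "E" → k ≠ "B" → s1.2.getD k 0 = c.getD k 0 :=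
    fun k h1 h2 => pv_stepB_pres "E" "B" 2 (total, c) k h1 h2
  have gF1 : s1.2.getD "F" 0 = c.getD "F" 0 := g1 "F" (by decide) (by decide)
  rw [pv_step_eq "F" "F" 2 (by norm_num) s1 (gF1 ▸ hF) (fun _ => gF1 ▸ hF)]
  set s2 := pvStepB s1 ("F", 2, "F", 1) with hs2
  have g2 : ∀ k, k ≠ "F" → s2.2.getD k 0 = s1.2.getD k 0 :=
    fun k h1 => pv_stepB_pres "F" "F" 2 s1 k h1 h1
  have gN2 : s2.2.getD "N" 0 = c.getD "N" 0 := by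
    rw [g2 "N" (by decide), g1 "N" (by decide) (by decide)]
  have gM2 : s2.2.getD "M" 0 = c.getD "M" 0 := by
    rw [g2 "M" (by decide), g1 "M" (by decide) (by decide)]
  rw [pv_step_eq "N" "M" 3 (by norm_num) s2 (gN2 ▸ hN) (fun h => gM2 ▸ hNM (gN2 ▸ h))]
  set s3 := pvStepB s2 ("N", 3, "M", 1) with hs3
  have g3 : ∀ k, k ≠ "N" → k ≠ "M" → s3.2.getD k 0 = s2.2.getD k 0 :=
    fun k h1 h2 => pv_stepB_pres "N" "M" 3 s2 k h1 h2
  have gR3 : s3.2.getD "R" 0 = c.getD "R" 0 := by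
    rw [g3 "R" (by decide) (by decide), g2 "R" (by decide), g1 "R" (by decide) (by decide)]
  have gQ3 : s3.2.getD "Q" 0 = c.getD "Q" 0 := by
    rw [g3 "Q" (by decide) (by decide), g2 "Q" (by decide), g1 "Q" (by decide) (by decide)]
  rw [pv_step_eq "R" "Q" 3 (by norm_num) s3 (gR3 ▸ hR) (fun h => gQ3 ▸ hRQ (gR3 ▸ h))]
  set s4 := pvStepB s3 ("R", 3, "Q", 1) with hs4
  have g4 : ∀ k, k ≠ "R" → k ≠ "Q" → s4.2.getD k 0 = s3.2.getD k 0 :=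
    fun k h1 h2 => pv_stepB_pres "R" "Q" 3 s3 k h1 h2
  have gU4 : s4.2.getD "U" 0 = c.getD "U" 0 := by
    rw [g4 "U" (by decide) (by decide), g3 "U" (by decide) (by decide), g2 "U" (by decide),
        g1 "U" (by decide) (by decide)]
  rw [pv_step_eq "U" "U" 3 (by norm_num) s4 (gU4 ▸ hU) (fun _ => gU4 ▸ hU)]

-- ===== VERDICT (by name: the statement is the Claim_ definition above) =====
theorem process_freebies_spec : Claim_equal_process_freebies := by
  intro cart total _hdom hpre
  obtain ⟨hE, hF, hN, hR, hU, hEB, hNM, hRQ⟩ := hpre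
  unfold Spec_process_freebies process_freebies process_freebies_alt
  rw [pv_chain total (PySem.Dict.mk cart) hE hF hN hR hU
        (fun h => (hEB h).1) (fun h => (hNM h).1) (fun h => (hRQ h).1)]
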